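-- pv_equiv track=rewrite | github.com/ITT-21SS-UR/assignment6-modellinginteraction-lm6 | calculator_experiment.py | __get_balanced_condition_list
-- ===== SOURCE A (Python) =====
-- def __get_balanced_condition_list(condition_list, participant_id):
--     condition_count = len(condition_list)
--
--     # First we need to create a balanced latin square according to our number of conditions:
--     # https://medium.com/@graycoding/balanced-latin-squares-in-python-2c3aa6ec95b9
--     balanced_order = [[((j // 2 + 1 if j % 2 else condition_count - j // 2) + i) % condition_count + 1 for j in
--                        range(condition_count)] for i in range(condition_count)]
--     if condition_count % 2:  # Repeat reversed for odd n
--         balanced_order += [seq[::-1] for seq in balanced_order]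
--     order_for_participant = balanced_order[participant_id % condition_count]
--
--     # Now we will reorder our conditions-list with the balanced-latin-square order we created above
--     # https://stackoverflow.com/questions/2177590/how-can-i-reorder-a-list/2177607
--     for i in range(len(order_for_participant)):
--         order_for_participant[i] -= 1
--
--     return [condition_list[i] for i in order_for_participant]
-- ===== SOURCE B (Python) =====
-- def __get_balanced_condition_list(condition_list, participant_id):
--     # Compute only the single Latin-square row this participant needs: O(n) instead of
--     # building the whole n x n square.
--     n = len(condition_list)
--     i = participant_id % n
--     return [condition_list[((j // 2 + 1 if j % 2 else n - j // 2) + i) % n]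
--             for j in range(n)]
-- ===== Notes on version B (the rewrite author's own statement) =====
-- stated objective: faster
-- what changed: Instead of materialising the whole n x n balanced Latin square (plus its reversed copy for odd n), picking one row and decrementing it in a second pass, B computes just the single row for participant_id % n directly in one comprehension (the appended reversed rows of A are unreachable anyway since the index is taken mod n).
-- outside the precondition, e.g. on __get_balanced_condition_list([], 0): A raises ZeroDivisionError, B raises ZeroDivisionError
import Mathlib
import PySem

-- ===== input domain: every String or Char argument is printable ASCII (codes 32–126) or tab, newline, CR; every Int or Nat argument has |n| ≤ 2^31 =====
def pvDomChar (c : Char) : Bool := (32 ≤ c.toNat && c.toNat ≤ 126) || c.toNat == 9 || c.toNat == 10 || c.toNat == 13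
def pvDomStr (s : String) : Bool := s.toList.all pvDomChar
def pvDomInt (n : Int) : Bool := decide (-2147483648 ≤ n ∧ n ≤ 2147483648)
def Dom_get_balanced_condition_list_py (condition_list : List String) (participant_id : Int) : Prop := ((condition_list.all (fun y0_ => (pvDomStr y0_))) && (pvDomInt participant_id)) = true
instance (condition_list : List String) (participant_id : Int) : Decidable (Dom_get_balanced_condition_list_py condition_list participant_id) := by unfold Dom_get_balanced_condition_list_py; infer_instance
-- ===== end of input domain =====

-- B computes only the single Latin-square row for participant_id % n instead of the whole
-- n x n square: asymptotically faster (O(n) vs O(n^2)); return values agree everywhere A returns.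

-- ===== PORT A =====
def get_balanced_condition_list_py (condition_list : List String) (participant_id : Int) : List String :=
  let condition_count : Int := condition_list.length
  let balanced_order : List (List Int) :=
    (PySem.List.pyRange 0 condition_count 1).map (fun i =>
      (PySem.List.pyRange 0 condition_count 1).map (fun j =>
        PySem.Int.mod ((if PySem.Int.mod j 2 ≠ 0 then PySem.Int.floordiv j 2 + 1
                        else condition_count - PySem.Int.floordiv j 2) + i) condition_count + 1))
  let balanced_order :=
    if PySem.Int.mod condition_count 2 ≠ 0 then
      balanced_order ++ balanced_order.map (fun seq => (PySem.List.slice? seq none none (-1)).getD [])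
    else balanced_order
  let order_for_participant : List Int :=
    PySem.List.pyGetD balanced_order (PySem.Int.mod participant_id condition_count) []
  let order_for_participant :=
    (PySem.List.pyRange 0 (order_for_participant.length : Int) 1).foldl
      (fun acc i => PySem.List.pySetD acc i (PySem.List.pyGetD acc i 0 - 1)) order_for_participant
  order_for_participant.map (fun i => PySem.List.pyGetD condition_list i "")

-- ===== PORT B =====
def get_balanced_condition_list_py_alt (condition_list : List String) (participant_id : Int) : List String :=
  let n : Int := condition_list.length
  let i := PySem.Int.mod participant_id n
  (PySem.List.pyRange 0 n 1).map (fun j =>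
    PySem.List.pyGetD condition_list
      (PySem.Int.mod ((if PySem.Int.mod j 2 ≠ 0 then PySem.Int.floordiv j 2 + 1
                       else n - PySem.Int.floordiv j 2) + i) n) "")

-- ===== PRECONDITION & SPEC =====
-- Pre_ excludes only the empty list, on which A raises ZeroDivisionError (participant_id % 0).
def Pre_get_balanced_condition_list_py (condition_list : List String) (participant_id : Int) : Prop :=
  condition_list ≠ []
instance (condition_list : List String) (participant_id : Int) : Decidable (Pre_get_balanced_condition_list_py condition_list participant_id) := by unfold Pre_get_balanced_condition_list_py; infer_instance
def pvWitness_get_balanced_condition_list_py : List String × Int := (["a", "b", "c"], 4)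
def Spec_get_balanced_condition_list_py (condition_list : List String) (participant_id : Int) (out : List String) : Prop := out = get_balanced_condition_list_py_alt condition_list participant_id
instance (condition_list : List String) (participant_id : Int) (out : List String) : Decidable (Spec_get_balanced_condition_list_py condition_list participant_id out) := by unfold Spec_get_balanced_condition_list_py; infer_instance

-- ===== CLAIM (what is proved, stated in full; the proofs are below) =====
def Claim_equal_get_balanced_condition_list_py : Prop := ∀ (condition_list : List String) (participant_id : Int), Dom_get_balanced_condition_list_py condition_list participant_id → Pre_get_balanced_condition_list_py condition_list participant_id → Spec_get_balanced_condition_list_py condition_list participant_id (get_balanced_condition_list_py condition_list participant_id)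

-- ===== LEMMAS AND PROOFS =====

-- The in-place decrement loop 'for i in range(len(xs)): xs[i] -= 1' maps (· - 1) over the list.
theorem pv_dec_loop_aux (d : Nat) : ∀ (xs : List Int) (a : Nat), xs.length - a = d →
    (PySem.List.pyRange (a : Int) (xs.length : Int) 1).foldl
      (fun acc i => PySem.List.pySetD acc i (PySem.List.pyGetD acc i 0 - 1)) xs
    = xs.take a ++ (xs.drop a).map (· - 1) := by
  induction d with
  | zero =>
      intro xs a h
      have hlen : xs.length ≤ a := by omega
      rw [PySem.List.pyRange_one]
      have : ((xs.length : Int) - (a : Int)).toNat = 0 := by omega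
      simp [this, List.take_of_length_le hlen, List.drop_of_length_le hlen]
  | succ d ih =>
      intro xs a h
      have ha : a < xs.length := by omega
      have hcons : PySem.List.pyRange (a : Int) (xs.length : Int) 1
          = (a : Int) :: PySem.List.pyRange ((a : Int) + 1) (xs.length : Int) 1 := by
        apply PySem.List.pyRange_one_cons; exact_mod_cast ha
      rw [hcons]
      simp only [List.foldl_cons]
      set ys : List Int := PySem.List.pySetD xs (a : Int) (PySem.List.pyGetD xs (a : Int) 0 - 1) with hys
      have hys' : ys = xs.set a (xs.getD a 0 - 1) := by
        simp [hys, PySem.List.pySetD_natCast, PySem.List.pyGetD_natCast]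
      have hylen : ys.length = xs.length := by simp [hys']
      have hstep : ((a : Int) + 1) = ((a + 1 : Nat) : Int) := by push_cast; ring
      have hih := ih ys (a + 1) (by omega)
      rw [hylen] at hih
      rw [hstep, hih]
      have hgetD : xs.getD a 0 = xs[a] := List.getD_eq_getElem xs 0 ha
      rw [hys', hgetD]
      have hset : xs.set a (xs[a] - 1) = xs.take a ++ (xs[a] - 1) :: xs.drop (a + 1) := by
        rw [List.set_eq_take_append_cons_drop]; simp [ha]
      rw [hset, List.take_append, List.drop_append]
      have h1 : List.take (a + 1) (List.take a xs) = List.take a xs := by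
        rw [List.take_take]; congr 1; omega
      have h2 : a + 1 - (List.take a xs).length = 1 := by simp; omega
      have h3 : List.drop (a + 1) (List.take a xs) = [] := by
        apply List.drop_eq_nil_of_le; simp
      rw [h1, h2, h3]
      simp
      rw [List.drop_eq_getElem_cons (show a < (List.map (fun x => x - 1) xs).length by
        simpa using ha)]
      simp

theorem pv_dec_loop (xs : List Int) :
    (PySem.List.pyRange 0 (xs.length : Int) 1).foldl
      (fun acc i => PySem.List.pySetD acc i (PySem.List.pyGetD acc i 0 - 1)) xs
    = xs.map (· - 1) := by
  have := pv_dec_loop_aux xs.length xs 0 (by omega)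
  simpa using this

-- ===== VERDICT (by name: the statement is the Claim_ definition above) =====
theorem get_balanced_condition_list_py_spec : Claim_equal_get_balanced_condition_list_py := by
  intro condition_list participant_id _ hpre
  unfold Spec_get_balanced_condition_list_py
  unfold Pre_get_balanced_condition_list_py at hpre
  simp only [get_balanced_condition_list_py, get_balanced_condition_list_py_alt]
  set n : Int := (condition_list.length : Int) with hn
  have hnpos : 0 < n := by
    have : condition_list.length ≠ 0 := by simpa using hpre
    omega
  set f : Int → List Int := fun i =>
    (PySem.List.pyRange 0 n 1).map (fun j =>
      PySem.Int.mod ((if PySem.Int.mod j 2 ≠ 0 then PySem.Int.floordiv j 2 + 1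
                      else n - PySem.Int.floordiv j 2) + i) n + 1) with hf
  set i0 : Int := PySem.Int.mod participant_id n with hi0
  have hi0nn : 0 ≤ i0 := PySem.Int.mod_nonneg participant_id hnpos
  have hi0lt : i0 < n := PySem.Int.mod_lt participant_id hnpos
  have hlenL : ((PySem.List.pyRange 0 n 1).map f).length = n.toNat := by
    simp [PySem.List.pyRange_one]
  have hrow2 : PySem.List.pyGetD ((PySem.List.pyRange 0 n 1).map f) i0 [] = f i0 :=
    PySem.List.pyGetD_map_pyRange_of_nonneg f n i0 [] hi0nn hi0lt
  -- the selected row is f i0, whether or not the reversed copies were appended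
  have hrow : ∀ (L : List (List Int)),
      PySem.List.pyGetD ((PySem.List.pyRange 0 n 1).map f ++ L) i0 [] = f i0 := by
    intro L
    have hir : i0.toNat < ((PySem.List.pyRange 0 n 1).map f).length := by
      rw [hlenL]; omega
    rw [PySem.List.pyGetD_eq_getElem _ _ hi0nn
      (by rw [List.length_append, hlenL]; push_cast; omega)]
    rw [List.getElem_append_left hir]
    have h0 := hrow2
    rw [PySem.List.pyGetD_eq_getElem _ _ hi0nn (by rw [hlenL]; omega)] at h0
    exact h0
  split
  · rw [hrow, pv_dec_loop]
    simp [hf, List.map_map, Function.comp]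
  · rw [hrow2, pv_dec_loop]
    simp [hf, List.map_map, Function.comp]
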